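-- pv_equiv track=rewrite | github.com/EvanYZhao/CS35L | topo_order_commits.py | branch_commit_relations
-- ===== SOURCE A (Python) =====
-- def branch_commit_relations(branch_paths, commit_list):
--     return_dict = {}
--     for i in range(len(branch_paths)):
--         # Extracts branch name from end of absolute path URL
--         branch_name = branch_paths[i][branch_paths[i].index("heads") + 6 :]
--         if commit_list[i] in return_dict:
--             return_dict[commit_list[i]].append(branch_name)
--         else:
--             return_dict[commit_list[i]] = [branch_name]
--
--     # Sorts branch names in lexicographical order
--     for key in return_dict:
--         return_dict[key] = sorted(return_dict[key])
--
--     return return_dict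
-- ===== SOURCE B (Python) =====
-- def branch_commit_relations(branch_paths, commit_list):
--     commits = commit_list[:len(branch_paths)]
--     names = [p[p.index("heads") + 6:] for p in branch_paths]
--     pairs = sorted(zip(names, commits), key=lambda t: t[0])
--     return {c: [n for n, cc in pairs if cc == c] for c in dict.fromkeys(commits)}
-- ===== Notes on version B (the rewrite author's own statement) =====
-- stated objective: alternative
-- what changed: B replaces A's incremental dict building followed by a per-key sort of each group with one global stable sort of all (branch_name, commit) pairs and filter-based grouping over the commits in first-occurrence order, so no per-group sort call remains.
import Mathlib
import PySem

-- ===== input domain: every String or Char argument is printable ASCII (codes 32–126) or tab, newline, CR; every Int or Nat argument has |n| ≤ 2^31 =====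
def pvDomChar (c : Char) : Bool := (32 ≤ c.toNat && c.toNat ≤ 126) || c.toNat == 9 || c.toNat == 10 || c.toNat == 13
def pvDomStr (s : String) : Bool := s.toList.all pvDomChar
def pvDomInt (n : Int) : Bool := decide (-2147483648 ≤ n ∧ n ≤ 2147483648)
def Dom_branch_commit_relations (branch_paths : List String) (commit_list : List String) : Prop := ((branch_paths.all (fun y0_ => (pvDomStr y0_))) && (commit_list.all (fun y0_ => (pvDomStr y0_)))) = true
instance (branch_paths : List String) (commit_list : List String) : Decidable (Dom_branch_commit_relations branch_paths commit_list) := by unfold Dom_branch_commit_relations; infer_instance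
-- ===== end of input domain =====

-- B replaces A's incremental dict building with per-key sorts by one global stable sort of
-- (branch_name, commit) pairs followed by filter-based grouping over first-occurrence commits
-- (objective: alternative decomposition; same asymptotic cost).

-- ===== PORT A =====
-- branch_paths[i][branch_paths[i].index("heads") + 6:]  (inside Pre_, "heads" occurs, so .index = find)
def pvExtractA (p : String) : String :=
  PySem.Str.slice p (some (PySem.Str.find p "heads" + 6)) none

def branch_commit_relations (branch_paths : List String) (commit_list : List String) : List (String × List String) :=
  let d : PySem.Dict String (List String) :=
    (PySem.List.pyRange 0 (PySem.List.len branch_paths) 1).foldl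
      (fun d i =>
        let branch_name := pvExtractA (PySem.List.pyGetD branch_paths i "")
        let c := PySem.List.pyGetD commit_list i ""
        if d.contains c then d.modify c [] (fun l => l ++ [branch_name])
        else d.insert c [branch_name])
      PySem.Dict.empty
  let d2 := d.keys.foldl
      (fun d' k => d'.modify k [] (fun l => PySem.List.sorted l (fun x => x) false)) d
  d2.items

-- ===== PORT B =====
def branch_commit_relations_alt (branch_paths : List String) (commit_list : List String) : List (String × List String) :=
  let commits := PySem.List.slice commit_list none (some (PySem.List.len branch_paths))
  let names := branch_paths.map (fun p => PySem.Str.slice p (some (PySem.Str.find p "heads" + 6)) none)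
  let pairs := PySem.List.sorted (names.zip commits) (fun t => t.1) false
  (PySem.List.dedup commits).map
    (fun c => (c, (pairs.filter (fun t => t.2 == c)).map (fun t => t.1)))

-- ===== PRECONDITION & SPEC =====
-- Pre_ excludes exactly the inputs where the Python A raises: an IndexError when commit_list is
-- shorter than branch_paths, and a ValueError from .index when a path does not contain "heads".
def Pre_branch_commit_relations (branch_paths : List String) (commit_list : List String) : Prop :=
  branch_paths.length ≤ commit_list.length ∧
  ∀ p ∈ branch_paths, PySem.Str.isIn "heads" p = true
instance (branch_paths : List String) (commit_list : List String) : Decidable (Pre_branch_commit_relations branch_paths commit_list) := by unfold Pre_branch_commit_relations; infer_instance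

def pvWitness_branch_commit_relations : List String × List String :=
  (["refs/heads/zz", "refs/heads/aa", "refs/heads/mm"], ["c2", "c1", "c2"])

def Spec_branch_commit_relations (branch_paths : List String) (commit_list : List String) (out : List (String × List String)) : Prop := out = branch_commit_relations_alt branch_paths commit_list
instance (branch_paths : List String) (commit_list : List String) (out : List (String × List String)) : Decidable (Spec_branch_commit_relations branch_paths commit_list out) := by unfold Spec_branch_commit_relations; infer_instance

-- ===== CLAIM (what is proved, stated in full; the proofs are below) =====
def Claim_equal_branch_commit_relations : Prop := ∀ (branch_paths : List String) (commit_list : List String), Dom_branch_commit_relations branch_paths commit_list → Pre_branch_commit_relations branch_paths commit_list → Spec_branch_commit_relations branch_paths commit_list (branch_commit_relations branch_paths commit_list)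

-- ===== LEMMAS AND PROOFS =====

theorem pv_foldl_range_getD_zip {α β δ : Type} (xs : List α) (ys : List β) (dx : α) (dy : β)
    (f : δ → α → β → δ) (a : δ) (h : xs.length ≤ ys.length) :
    (List.range xs.length).foldl (fun d k => f d (xs.getD k dx) (ys.getD k dy)) a
      = (xs.zip ys).foldl (fun d p => f d p.1 p.2) a := by
  induction xs generalizing ys a with
  | nil => simp
  | cons x xs ih =>
    cases ys with
    | nil => simp at h
    | cons y ys =>
      simp only [List.length_cons, List.range_succ_eq_map, List.foldl_cons, List.foldl_map,
        List.getD_cons_zero, List.getD_cons_succ, List.zip_cons_cons]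
      exact ih ys (f a x y) (by simpa using h)

theorem pv_getD_foldl_modify_nodup {κ ν : Type} [BEq κ] [LawfulBEq κ] [DecidableEq κ]
    (ks : List κ) (d : PySem.Dict κ ν) (d0 : ν) (f : ν → ν) (c : κ) (h : ks.Nodup) :
    (ks.foldl (fun d' k => d'.modify k d0 f) d).getD c d0
      = if c ∈ ks then f (d.getD c d0) else d.getD c d0 := by
  induction ks generalizing d with
  | nil => simp
  | cons k ks ih =>
    simp only [List.foldl_cons, List.mem_cons]
    rw [ih _ (by exact h.of_cons)]
    by_cases hc : c ∈ ks
    · have hck : ¬ c = k := by rintro rfl; exact (List.nodup_cons.mp h).1 hc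
      simp [hc, hck, PySem.Dict.getD_modify]
    · by_cases hck : c = k
      · subst hck; simp [hc]
      · simp [hc, hck, PySem.Dict.getD_modify]

theorem pv_set_update_of_subset {α : Type} [BEq α] [LawfulBEq α]
    (s : PySem.Set α) (xs : List α) (h : ∀ x ∈ xs, x ∈ s) : PySem.Set.update s xs = s := by
  induction xs with
  | nil => rfl
  | cons x xs ih =>
    have : PySem.Set.update s (x :: xs) = PySem.Set.update (PySem.Set.add s x) xs := rfl
    rw [this, PySem.Set.add_of_mem (h x (by simp))]
    exact ih (fun y hy => h y (by simp [hy]))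

theorem pv_zip_extract {α β γ : Type} (g : α → γ) (bp : List α) (cl : List β) :
    (bp.zip cl).map (fun pc => (pc.2, g pc.1)) = (cl.take bp.length).zip (bp.map g) := by
  induction bp generalizing cl with
  | nil => simp
  | cons b bp ih =>
    cases cl with
    | nil => simp
    | cons c cl => simp [ih]

theorem pv_A_eq (bp cl : List String) (h : bp.length ≤ cl.length) :
    branch_commit_relations bp cl
      = (PySem.Set.ofList (cl.take bp.length)).map
          (fun c => (c, PySem.List.sorted ((((cl.take bp.length).zip (bp.map pvExtractA)).filter
              (fun t => t.1 == c)).map (fun t => t.2)) (fun x => x) false)) := by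
  unfold branch_commit_relations
  set qs : List (String × String) := (cl.take bp.length).zip (bp.map pvExtractA) with hqs
  -- Step 1: the first loop is a modify-fold over qs
  have h1 : (PySem.List.pyRange 0 (PySem.List.len bp) 1).foldl
      (fun d i =>
        let branch_name := pvExtractA (PySem.List.pyGetD bp i "")
        let c := PySem.List.pyGetD cl i ""
        if d.contains c then d.modify c [] (fun l => l ++ [branch_name])
        else d.insert c [branch_name])
      PySem.Dict.empty
      = qs.foldl (fun d p => d.modify p.1 [] (fun v => v ++ [p.2])) PySem.Dict.empty := by
    have hr : PySem.List.pyRange 0 (PySem.List.len bp) 1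
        = (List.range bp.length).map (fun (k : Nat) => ((k : Int))) := by
      rw [PySem.List.pyRange_one]
      simp only [PySem.List.len_eq, Int.sub_zero, Int.toNat_natCast, zero_add]
    rw [hr, List.foldl_map]
    simp only [PySem.List.pyGetD_natCast]
    rw [pv_foldl_range_getD_zip bp cl "" ""
      (f := fun (d : PySem.Dict String (List String)) (p c : String) =>
        if d.contains c then d.modify c [] (fun l => l ++ [pvExtractA p])
        else d.insert c [pvExtractA p]) _ h]
    have hbody : (fun (d : PySem.Dict String (List String)) (p : String × String) =>
        if d.contains p.2 then d.modify p.2 [] (fun l => l ++ [pvExtractA p.1])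
        else d.insert p.2 [pvExtractA p.1])
      = fun d p => d.modify p.2 [] (fun l => l ++ [pvExtractA p.1]) := by
      funext d p
      by_cases hcon : d.contains p.2
      · simp [hcon]
      · simp only [hcon]
        show d.insert p.2 [pvExtractA p.1] = d.insert p.2 (d.getD p.2 [] ++ [pvExtractA p.1])
        rw [PySem.Dict.getD_of_not_contains _ _ (by simpa using hcon)]
        rfl
    rw [hbody]
    have hq : qs = (bp.zip cl).map (fun pc => (pc.2, pvExtractA pc.1)) := by
      rw [pv_zip_extract]
    rw [hq]
    simp only [List.foldl_map]
  rw [h1]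
  set d : PySem.Dict String (List String) :=
    qs.foldl (fun d p => d.modify p.1 [] (fun v => v ++ [p.2])) PySem.Dict.empty with hd
  have hkeys : d.keys = PySem.Set.ofList (cl.take bp.length) := by
    rw [hd, PySem.Dict.keys_foldl_modify_key qs (fun p => p.1) [] (fun _ p v => v ++ [p.2])]
    have : qs.map (fun p => p.1) = cl.take bp.length := by
      apply List.map_fst_zip
      simp [List.length_take]
    rw [this]
    rw [PySem.Set.ofList_eq_foldl]
    rfl
  have hnodup : d.keys.Nodup := by rw [hkeys]; exact PySem.Set.nodup_ofList _
  have hgetD : ∀ c, d.getD c [] = (qs.filter (fun t => t.1 == c)).map (fun t => t.2) := by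
    intro c
    rw [hd, PySem.Dict.getD_foldl_modify_append]
    simp
  -- Step 2: the second loop sorts each value
  have hkeys2 : (d.keys.foldl (fun d' k => d'.modify k [] (fun l => PySem.List.sorted l (fun x => x) false)) d).keys = d.keys := by
    rw [PySem.Dict.keys_foldl_modify_key d.keys (fun k => k) [] (fun _ k v => PySem.List.sorted v (fun x => x) false)]
    rw [List.map_id']
    exact pv_set_update_of_subset _ _ (fun x hx => hx)
  have hget2 : ∀ c ∈ d.keys,
      (d.keys.foldl (fun d' k => d'.modify k [] (fun l => PySem.List.sorted l (fun x => x) false)) d).getD c []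
        = PySem.List.sorted (d.getD c []) (fun x => x) false := by
    intro c hc
    rw [pv_getD_foldl_modify_nodup d.keys d [] _ c hnodup]
    simp [hc]
  rw [PySem.Dict.items_eq_map_keys _ (by rw [hkeys2]; exact hnodup) []]
  rw [hkeys2, ← hkeys]
  apply List.map_congr_left
  intro c hc
  rw [hget2 c hc, hgetD c]

theorem pv_B_eq (bp cl : List String) :
    branch_commit_relations_alt bp cl
      = (PySem.Set.ofList (cl.take bp.length)).map
          (fun c => (c, ((PySem.List.sorted ((bp.map pvExtractA).zip (cl.take bp.length)) (fun t => t.1) false).filter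
              (fun t => t.2 == c)).map (fun t => t.1))) := by
  unfold branch_commit_relations_alt
  have hsl : PySem.List.slice cl none (some (PySem.List.len bp)) = cl.take bp.length := by
    simp [PySem.List.len_eq, PySem.List.slice_to_natCast]
  rw [hsl]
  have hex : (fun p => PySem.Str.slice p (some (PySem.Str.find p "heads" + 6)) none) = pvExtractA := rfl
  rw [hex]
  simp [PySem.List.dedup_eq_ofList]

-- sorting a group of names = taking the names of the group out of the pre-sorted pair list
theorem pv_sorted_filter_map (ps : List (String × String)) (c : String) :
    PySem.List.sorted ((ps.filter (fun t => t.2 == c)).map (fun t => t.1)) (fun x => x) false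
      = ((PySem.List.sorted ps (fun t => t.1) false).filter (fun t => t.2 == c)).map (fun t => t.1) := by
  apply PySem.List.eq_of_perm_of_pairwise_le_of_injective (fun x => x) (fun _ _ h => h)
  · exact (PySem.List.sorted_perm _ _ _).trans
      (((PySem.List.sorted_perm ps _ _).filter _).map _).symm
  · exact PySem.List.sorted_pairwise _ _
  · exact List.pairwise_map.mpr ((PySem.List.sorted_pairwise ps (fun t => t.1)).filter _)

-- ===== VERDICT (by name: the statement is the Claim_ definition above) =====
theorem branch_commit_relations_spec : Claim_equal_branch_commit_relations := by
  intro bp cl _ hpre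
  obtain hlen := hpre.1
  unfold Spec_branch_commit_relations
  rw [pv_A_eq bp cl hlen, pv_B_eq bp cl]
  apply List.map_congr_left
  intro c _
  have hswap : (cl.take bp.length).zip (bp.map pvExtractA)
      = ((bp.map pvExtractA).zip (cl.take bp.length)).map Prod.swap :=
    (List.zip_swap _ _).symm
  rw [hswap, List.filter_map, List.map_map]
  simp only [Function.comp_def, Prod.fst_swap, Prod.snd_swap]
  rw [pv_sorted_filter_map]
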